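-- pv_equiv track=rewrite | github.com/inst-multi-chain/TFM-instability | abstract-fee-and-load/load/fetch_rpc_hour_windows.py | _parse_fee_value
-- ===== SOURCE A (Python) =====
-- def _parse_fee_value(val: str, denom: str) -> int:
--     """Parse coin string like '123uosmo,10uatom' and return amount for denom as int."""
--     if not val:
--         return 0
--     total = 0
--     parts = val.split(",")
--     for p in parts:
--         p = p.strip()
--         if not p:
--             continue
--         num = ""
--         i = 0
--         while i < len(p) and p[i].isdigit():
--             num += p[i]
--             i += 1
--         denom_part = p[i:]
--         if denom_part != denom or not num:
--             continue
--         try: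
--             total += int(num)
--         except ValueError:
--             continue
--     return total
-- ===== SOURCE B (Python) =====
-- def _parse_fee_value(val: str, denom: str) -> int:
--     """Tabulate every coin part into a denom->total dict, then look up denom once."""
--     totals = {}
--     for part in val.split(","):
--         p = part.strip()
--         i = 0
--         while i < len(p) and p[i].isdigit():
--             i += 1
--         num, suffix = p[:i], p[i:]
--         if not num:
--             continue
--         try:
--             amount = int(num)
--         except ValueError:
--             continue
--         totals[suffix] = totals.get(suffix, 0) + amount
--     return totals.get(denom, 0)
-- ===== Notes on version B (the rewrite author's own statement) =====
-- stated objective: alternative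
-- what changed: B parses every comma-part once into a dict mapping denom-suffix to running total and answers with a single totals.get(denom, 0), instead of testing the denom inside the loop and keeping one accumulator; the digit scan counts an index and slices rather than concatenating characters.
import Mathlib
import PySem

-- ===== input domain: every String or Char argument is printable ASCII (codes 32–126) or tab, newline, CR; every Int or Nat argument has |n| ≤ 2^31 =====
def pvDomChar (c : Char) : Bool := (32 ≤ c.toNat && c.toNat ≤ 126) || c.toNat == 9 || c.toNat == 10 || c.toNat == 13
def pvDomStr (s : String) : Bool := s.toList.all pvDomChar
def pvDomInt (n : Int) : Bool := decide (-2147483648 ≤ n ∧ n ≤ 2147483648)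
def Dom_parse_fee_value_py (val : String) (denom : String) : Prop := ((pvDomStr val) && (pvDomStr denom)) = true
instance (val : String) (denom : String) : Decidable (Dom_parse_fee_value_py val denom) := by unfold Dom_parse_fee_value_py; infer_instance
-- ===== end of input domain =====

-- B tabulates all denoms in one dict and looks denom up once; A filters on denom inside the loop. Equal everywhere; return value only (no mutation).

-- ===== PORT A =====
-- the inner `while i < len(p) and p[i].isdigit(): num += p[i]; i += 1` loop: num is the accumulator, the returned rest is p[i:]
def pvScanA (p : List Char) (num : List Char) : List Char × List Char :=
  match p with
  | [] => (num, [])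
  | c :: rest => if PySem.Chars.isdigit c then pvScanA rest (num ++ [c]) else (num, c :: rest)

-- the body of A's for-loop (total is the accumulator)
def pvStepA (denomL : List Char) (total : Int) (p0 : List Char) : Int :=
  let p := PySem.Chars.strip p0
  if p = [] then total
  else
    let sc := pvScanA p []
    if sc.2 ≠ denomL ∨ sc.1 = [] then total
    else
      match PySem.Int.ofChars? sc.1 with
      | some n => total + n
      | none => total

def parse_fee_value_py (val : String) (denom : String) : Int :=
  if val = "" then 0
  else (PySem.Chars.splitOn val.toList [',']).foldl (pvStepA denom.toList) 0

-- ===== PORT B =====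
-- Source B's `while i < len(p) and p[i].isdigit(): i += 1`: i is the accumulator
def pvDigitLen (p : List Char) (i : Nat) : Nat :=
  match p with
  | [] => i
  | c :: rest => if PySem.Chars.isdigit c then pvDigitLen rest (i + 1) else i

-- Source B's for-loop building `totals`; p[:i] / p[i:] are List.take i / List.drop i (exact: 0 ≤ i ≤ len p here)
def pvLoopB (parts : List (List Char)) (totals : PySem.Dict (List Char) Int) : PySem.Dict (List Char) Int :=
  match parts with
  | [] => totals
  | part :: rest =>
    let p := PySem.Chars.strip part
    let i := pvDigitLen p 0
    let num := p.take i
    let suffix := p.drop i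
    if num = [] then pvLoopB rest totals
    else
      match PySem.Int.ofChars? num with
      | none => pvLoopB rest totals
      | some amount => pvLoopB rest (totals.insert suffix (totals.getD suffix 0 + amount))

def parse_fee_value_py_alt (val : String) (denom : String) : Int :=
  (pvLoopB (PySem.Chars.splitOn val.toList [',']) PySem.Dict.empty).getD denom.toList 0

-- ===== PRECONDITION & SPEC =====
def Spec_parse_fee_value_py (val : String) (denom : String) (out : Int) : Prop := out = parse_fee_value_py_alt val denom
instance (val : String) (denom : String) (out : Int) : Decidable (Spec_parse_fee_value_py val denom out) := by unfold Spec_parse_fee_value_py; infer_instance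

-- ===== CLAIM (what is proved, stated in full; the proofs are below) =====
def Claim_equal_parse_fee_value_py : Prop := ∀ (val : String) (denom : String), Dom_parse_fee_value_py val denom → Spec_parse_fee_value_py val denom (parse_fee_value_py val denom)

-- ===== LEMMAS AND PROOFS =====

theorem pvDigitLen_acc (p : List Char) (i : Nat) : pvDigitLen p i = i + pvDigitLen p 0 := by
  induction p generalizing i with
  | nil => simp [pvDigitLen]
  | cons c rest ih =>
    simp only [pvDigitLen]
    by_cases h : PySem.Chars.isdigit c = true
    · simp [h]; rw [ih, ih 1]; omega
    · simp [h]

theorem pvScanA_eq (p : List Char) (acc : List Char) :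
    pvScanA p acc = (acc ++ p.take (pvDigitLen p 0), p.drop (pvDigitLen p 0)) := by
  induction p generalizing acc with
  | nil => simp [pvScanA, pvDigitLen]
  | cons c rest ih =>
    simp only [pvScanA, pvDigitLen]
    by_cases h : PySem.Chars.isdigit c = true
    · rw [if_pos h, if_pos h, ih, pvDigitLen_acc rest 1, Nat.add_comm 1]
      simp
    · simp [h]

theorem pvStepA_eval (k : List Char) (t : Int) (part : List Char) :
    pvStepA k t part =
      if (PySem.Chars.strip part).take (pvDigitLen (PySem.Chars.strip part) 0) = [] ∨
         (PySem.Chars.strip part).drop (pvDigitLen (PySem.Chars.strip part) 0) ≠ k then t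
      else
        match PySem.Int.ofChars? ((PySem.Chars.strip part).take (pvDigitLen (PySem.Chars.strip part) 0)) with
        | some n => t + n
        | none => t := by
  unfold pvStepA
  simp only [pvScanA_eq, List.nil_append]
  set p := PySem.Chars.strip part with hp
  by_cases hpe : p = []
  · simp [hpe, pvDigitLen]
  · simp only [hpe, ite_false, if_neg, not_false_iff]
    by_cases hnum : p.take (pvDigitLen p 0) = []
    · simp [hnum]
    · by_cases hsuf : p.drop (pvDigitLen p 0) = k
      · simp [hnum, hsuf]
      · simp [hnum, hsuf]

theorem pvLoop_inv (k : List Char) (parts : List (List Char)) (t : Int) (d : PySem.Dict (List Char) Int) :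
    parts.foldl (pvStepA k) t + d.getD k 0 = (pvLoopB parts d).getD k 0 + t := by
  induction parts generalizing t d with
  | nil => simp [pvLoopB]; ring
  | cons part rest ih =>
    rw [List.foldl_cons, pvStepA_eval]
    simp only [pvLoopB]
    set p := PySem.Chars.strip part with hp
    set i := pvDigitLen p 0 with hi
    by_cases hnum : p.take i = []
    · simpa [hnum] using ih t d
    · by_cases hsuf : p.drop i = k
      · cases hint : PySem.Int.ofChars? (p.take i) with
        | none => simpa [hnum, hsuf, hint] using ih t d
        | some n =>
          have h2 := ih (t + n) (d.insert (p.drop i) (d.getD (p.drop i) 0 + n))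
          rw [PySem.Dict.getD_insert, hsuf, if_pos rfl] at h2
          simp only [hnum, hsuf, ne_eq, not_true_eq_false, or_false, if_neg, not_false_iff]
          omega
      · cases hint : PySem.Int.ofChars? (p.take i) with
        | none => simpa [hnum, hsuf, hint] using ih t d
        | some n =>
          have h2 := ih t (d.insert (p.drop i) (d.getD (p.drop i) 0 + n))
          rw [PySem.Dict.getD_insert, if_neg (Ne.symm hsuf)] at h2
          simpa [hnum, hsuf, hint] using h2

-- ===== VERDICT (by name: the statement is the Claim_ definition above) =====
theorem parse_fee_value_py_spec : Claim_equal_parse_fee_value_py := by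
  intro val denom _
  unfold Spec_parse_fee_value_py parse_fee_value_py parse_fee_value_py_alt
  by_cases hv : val = ""
  · subst hv
    have h0 : PySem.Chars.splitOn ("" : String).toList [','] = [[]] := by decide
    rw [h0]
    simp only [pvLoopB]
    simp [show PySem.Chars.strip ([] : List Char) = [] from by decide, PySem.Dict.getD_empty]
  · rw [if_neg hv]
    have := pvLoop_inv denom.toList (PySem.Chars.splitOn val.toList [',']) 0 PySem.Dict.empty
    simpa [PySem.Dict.getD_empty] using this
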